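-- pv_equiv track=rewrite | github.com/gtyagi777/Problem-Solving---Algorithms- | SPOJ/untitled2.py | solution
-- ===== SOURCE A (Python) =====
-- def solution(arr):
--     n = len(arr)
--     c= 1
--
--     for i in range(n-1):
--         ind = i
--         jump = 1
--         boo = 1
--
--         while(ind != n-1):
--             val = 9999
--             cidx = -1
--
--             for k in range(ind + 1,n):
--                 if k%2 == 1:
--                     if arr[k] > arr[ind] and arr[k] - arr[ind] < val:
--                         val = arr[k] - arr[ind]
--                         cidx = k
--                 else:
--                     if arr[k] < arr[ind] and arr[ind] - arr[k] < val:
--                         val = arr[ind] - arr[k]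
--                         cidx = k
--
--             if val == 9999:
--                 boo = 0
--                 break
--
--             jump += 1
--             ind = cidx
--
--         if boo ==1:
--             c+= 1
--
--     return c
-- ===== SOURCE B (Python) =====
-- def solution(arr):
--     n = len(arr)
--     # precompute the deterministic jump target of each index once
--     nxt = []
--     for i in range(n):
--         best = None  # (diff, index)
--         for k in range(i + 1, n):
--             d = arr[k] - arr[i] if k % 2 == 1 else arr[i] - arr[k]
--             bound = best[0] if best is not None else 9999
--             if 0 < d < bound:
--                 best = (d, k)
--         nxt.append(None if best is None else best[1])
--     # reachability of the last index, computed right-to-left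
--     reach = {}
--     if n > 0:
--         reach[n - 1] = True
--     for i in range(n - 2, -1, -1):
--         j = nxt[i]
--         reach[i] = j is not None and reach[j]
--     return 1 + sum(1 for i in range(n - 1) if reach[i])
-- ===== Notes on version B (the rewrite author's own statement) =====
-- stated objective: faster
-- what changed: A re-runs the full jump chain (with an O(n) scan per hop) from every start index; B precomputes each index's jump target once and then fills a reachability table right-to-left, so each start is answered by one lookup.
import Mathlib
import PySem

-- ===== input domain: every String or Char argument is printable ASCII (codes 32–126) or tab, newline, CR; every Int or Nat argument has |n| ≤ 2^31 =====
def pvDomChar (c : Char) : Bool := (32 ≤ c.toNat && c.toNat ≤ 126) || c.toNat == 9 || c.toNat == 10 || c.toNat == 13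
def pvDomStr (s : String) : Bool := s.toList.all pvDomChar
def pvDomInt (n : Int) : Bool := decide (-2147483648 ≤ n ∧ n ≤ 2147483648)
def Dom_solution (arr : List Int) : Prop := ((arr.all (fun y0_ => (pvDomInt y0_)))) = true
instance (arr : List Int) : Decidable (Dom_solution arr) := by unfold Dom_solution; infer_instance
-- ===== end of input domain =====

-- B replaces A's per-start re-scanned jump chains by a single precomputed jump table plus a
-- right-to-left reachability pass (same return value; objective: faster, O(n^2) vs O(n^3)).

-- ===== PORT A =====
-- inner 'for k in range(ind+1, n)' scan of A, returning (val, cidx)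
def findNextA (arr : List Int) (n ind : Int) : Int × Int :=
  (PySem.List.pyRange (ind + 1) n 1).foldl
    (fun s k =>
      if PySem.Int.mod k 2 = 1 then
        if PySem.List.pyGetD arr k 0 > PySem.List.pyGetD arr ind 0 ∧
           PySem.List.pyGetD arr k 0 - PySem.List.pyGetD arr ind 0 < s.1 then
          (PySem.List.pyGetD arr k 0 - PySem.List.pyGetD arr ind 0, k)
        else s
      else
        if PySem.List.pyGetD arr k 0 < PySem.List.pyGetD arr ind 0 ∧
           PySem.List.pyGetD arr ind 0 - PySem.List.pyGetD arr k 0 < s.1 then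
          (PySem.List.pyGetD arr ind 0 - PySem.List.pyGetD arr k 0, k)
        else s)
    (9999, -1)

-- A's 'while ind != n-1' loop; the fuel only guards totality (ind strictly increases, so
-- arr.length + 1 steps are never exhausted — proved in the lemmas below), result 1 = boo
def chaseA (arr : List Int) (n : Int) : Nat → Int → Int
  | 0, _ => 0
  | fuel + 1, ind =>
    if ind = n - 1 then 1
    else
      let p := findNextA arr n ind
      if p.1 = 9999 then 0
      else chaseA arr n fuel p.2

def solution (arr : List Int) : Int :=
  let n : Int := PySem.List.len arr
  (PySem.List.pyRange 0 (n - 1) 1).foldl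
    (fun c i => c + chaseA arr n (arr.length + 1) i) 1

-- ===== PORT B =====
-- B's inner scan for the jump target of i: best = None / (diff, index)
def nextB (arr : List Int) (n i : Int) : Option (Int × Int) :=
  (PySem.List.pyRange (i + 1) n 1).foldl
    (fun best k =>
      let d := if PySem.Int.mod k 2 = 1 then
                 PySem.List.pyGetD arr k 0 - PySem.List.pyGetD arr i 0
               else
                 PySem.List.pyGetD arr i 0 - PySem.List.pyGetD arr k 0
      let bound := match best with | some b => b.1 | none => 9999
      if 0 < d ∧ d < bound then some (d, k)
      else best)
    none

def solution_alt (arr : List Int) : Int :=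
  let n : Int := PySem.List.len arr
  let nxt : List (Option Int) :=
    (PySem.List.pyRange 0 n 1).map (fun i => (nextB arr n i).map (·.2))
  let r0 : PySem.Dict Int Bool :=
    if 0 < n then (PySem.Dict.empty : PySem.Dict Int Bool).insert (n - 1) true
    else PySem.Dict.empty
  let r := (PySem.List.pyRange (n - 2) (-1) (-1)).foldl
    (fun r i =>
      r.insert i (match PySem.List.pyGetD nxt i none with
        | some j => r.getD j false
        | none => false)) r0
  1 + (PySem.List.pyRange 0 (n - 1) 1).foldl
        (fun s i => s + (if r.getD i false then 1 else 0)) 0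

-- ===== PRECONDITION & SPEC =====
def Spec_solution (arr : List Int) (out : Int) : Prop := out = solution_alt arr
instance (arr : List Int) (out : Int) : Decidable (Spec_solution arr out) := by unfold Spec_solution; infer_instance

-- ===== CLAIM (what is proved, stated in full; the proofs are below) =====
def Claim_equal_solution : Prop := ∀ (arr : List Int), Dom_solution arr → Spec_solution arr (solution arr)

-- ===== LEMMAS AND PROOFS =====

-- reachability of index n-1 along B's jump table, with fuel (proof-only helper)
def chainB (arr : List Int) (n : Int) : Nat → Int → Bool
  | 0, _ => false
  | f + 1, ind =>
    if ind = n - 1 then true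
    else match nextB arr n ind with
      | none => false
      | some b => chainB arr n f b.2

-- invariant tying A's (val, cidx) fold state to B's Option state
def stRel (n ind : Int) (s : Int × Int) (b : Option (Int × Int)) : Prop :=
  (s = (9999, -1) ∧ b = none) ∨ (s.1 < 9999 ∧ b = some s ∧ ind < s.2 ∧ s.2 < n)

lemma foldAB (arr : List Int) (n ind : Int) :
    ∀ (l : List Int), (∀ k ∈ l, ind < k ∧ k < n) →
    ∀ (s : Int × Int) (b : Option (Int × Int)), stRel n ind s b →
    stRel n ind
      (l.foldl (fun s k =>
        if PySem.Int.mod k 2 = 1 then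
          if PySem.List.pyGetD arr k 0 > PySem.List.pyGetD arr ind 0 ∧
             PySem.List.pyGetD arr k 0 - PySem.List.pyGetD arr ind 0 < s.1 then
            (PySem.List.pyGetD arr k 0 - PySem.List.pyGetD arr ind 0, k)
          else s
        else
          if PySem.List.pyGetD arr k 0 < PySem.List.pyGetD arr ind 0 ∧
             PySem.List.pyGetD arr ind 0 - PySem.List.pyGetD arr k 0 < s.1 then
            (PySem.List.pyGetD arr ind 0 - PySem.List.pyGetD arr k 0, k)
          else s) s)
      (l.foldl (fun best k =>
        let d := if PySem.Int.mod k 2 = 1 then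
                   PySem.List.pyGetD arr k 0 - PySem.List.pyGetD arr ind 0
                 else
                   PySem.List.pyGetD arr ind 0 - PySem.List.pyGetD arr k 0
        let bound := match best with | some b => b.1 | none => 9999
        if 0 < d ∧ d < bound then some (d, k)
        else best) b) := by
  intro l
  induction l with
  | nil => intro _ s b h; simpa using h
  | cons k l ih =>
    intro hl s b hrel
    simp only [List.foldl_cons]
    refine ih (fun x hx => hl x (List.mem_cons_of_mem _ hx)) _ _ ?_
    have hk := hl k (List.mem_cons_self ..)
    rcases hrel with ⟨hs, hb⟩ | ⟨h1, hb, h2, h3⟩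
    · subst hs; subst hb
      by_cases hpar : PySem.Int.mod k 2 = 1 <;>
        simp only [stRel, hpar, if_true, if_false] <;>
        split_ifs with hc1 hc2 <;> simp_all <;> omega
    · subst hb
      by_cases hpar : PySem.Int.mod k 2 = 1 <;>
        simp only [stRel, hpar, if_true, if_false] <;>
        split_ifs with hc1 hc2 <;> simp_all <;> omega

lemma findNext_rel (arr : List Int) (n ind : Int) :
    (findNextA arr n ind = (9999, -1) ∧ nextB arr n ind = none) ∨
    (findNextA arr n ind).1 < 9999 ∧ nextB arr n ind = some (findNextA arr n ind) ∧
      ind < (findNextA arr n ind).2 ∧ (findNextA arr n ind).2 < n := by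
  have h := foldAB arr n ind (PySem.List.pyRange (ind + 1) n 1)
    (fun k hk => by rw [PySem.List.mem_pyRange_one] at hk; omega)
    (9999, -1) none (Or.inl ⟨rfl, rfl⟩)
  rcases h with ⟨h1, h2⟩ | ⟨h1, h2, h3, h4⟩
  · exact Or.inl ⟨h1, h2⟩
  · exact Or.inr ⟨h1, h2, h3, h4⟩

lemma chase_eq_chain (arr : List Int) (n : Int) :
    ∀ (f : Nat) (ind : Int), chaseA arr n f ind = if chainB arr n f ind then 1 else 0 := by
  intro f
  induction f with
  | zero => intro ind; simp [chaseA, chainB]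
  | succ f ih =>
    intro ind
    by_cases h : ind = n - 1
    · simp [chaseA, chainB, h]
    · rcases findNext_rel arr n ind with ⟨ha, hb⟩ | ⟨h1, hb, _, _⟩
      · simp [chaseA, chainB, h, ha, hb]
      · have hne : (findNextA arr n ind).1 ≠ 9999 := by omega
        simp [chaseA, chainB, h, hb, hne, ih]

lemma chain_stable (arr : List Int) (n : Int) :
    ∀ (m f f' : Nat) (ind : Int), (n - 1 - ind).toNat ≤ m → m < f → m < f' →
      chainB arr n f ind = chainB arr n f' ind := by
  intro m
  induction m with
  | zero =>
    intro f f' ind hm hf hf'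
    obtain ⟨f1, rfl⟩ := Nat.exists_eq_succ_of_ne_zero (by omega : f ≠ 0)
    obtain ⟨f2, rfl⟩ := Nat.exists_eq_succ_of_ne_zero (by omega : f' ≠ 0)
    by_cases h : ind = n - 1
    · simp [chainB, h]
    · have hnil : nextB arr n ind = none := by
        unfold nextB
        rw [PySem.List.pyRange_one_eq_nil (by omega)]
        rfl
      simp [chainB, h, hnil]
  | succ m ih =>
    intro f f' ind hm hf hf'
    obtain ⟨f1, rfl⟩ := Nat.exists_eq_succ_of_ne_zero (by omega : f ≠ 0)
    obtain ⟨f2, rfl⟩ := Nat.exists_eq_succ_of_ne_zero (by omega : f' ≠ 0)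
    by_cases h : ind = n - 1
    · simp [chainB, h]
    · rcases findNext_rel arr n ind with ⟨_, hb⟩ | ⟨_, hb, hlt, hltn⟩
      · simp [chainB, h, hb]
      · simp only [chainB, h, hb, if_false]
        exact ih f1 f2 _ (by omega) (by omega) (by omega)

-- the dict built by B's right-to-left pass stores exactly chain-reachability
lemma down (arr : List Int) :
    ∀ (m : Nat) (r : PySem.Dict Int Bool),
      (m : Int) ≤ (arr.length : Int) - 1 →
      (∀ j : Int, (m : Int) ≤ j → j ≤ (arr.length : Int) - 1 →
        r.getD j false
          = chainB arr (arr.length : Int) (((arr.length : Int) - 1 - j).toNat + 1) j) →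
      ∀ j : Int, 0 ≤ j → j ≤ (arr.length : Int) - 1 →
        ((PySem.List.pyRange ((m : Int) - 1) (-1) (-1)).foldl
          (fun r i => r.insert i
            (match PySem.List.pyGetD
                ((PySem.List.pyRange 0 ((arr.length : Int)) 1).map
                  (fun i => (nextB arr ((arr.length : Int)) i).map (·.2))) i none with
              | some j => r.getD j false
              | none => false)) r).getD j false
        = chainB arr (arr.length : Int) (((arr.length : Int) - 1 - j).toNat + 1) j := by
  intro m
  induction m with
  | zero =>
    intro r _ hr j hj0 hj1
    rw [PySem.List.pyRange_neg_one_eq_nil (by omega)]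
    exact hr j (by omega) hj1
  | succ m ih =>
    intro r hm hr j hj0 hj1
    have hcast : ((m + 1 : Nat) : Int) - 1 = (m : Int) := by push_cast; ring
    rw [hcast, PySem.List.pyRange_neg_one_cons (by omega : (-1 : Int) < (m : Int)),
        List.foldl_cons]
    refine ih _ (by omega) ?_ j hj0 hj1
    intro j hjm hjn
    rw [PySem.Dict.getD_insert]
    by_cases hje : j = (m : Int)
    · subst hje
      rw [if_pos rfl]
      rw [PySem.List.pyGetD_map_pyRange_of_nonneg _ _ _ _ (by omega) (by omega)]
      have hne : (m : Int) ≠ (arr.length : Int) - 1 := by omega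
      rcases findNext_rel arr (arr.length : Int) (m : Int) with ⟨_, hb⟩ | ⟨_, hb, hlt, hltn⟩
      · simp [chainB, hne, hb]
      · simp only [hb, Option.map_some]
        have hv := hr (findNextA arr (arr.length : Int) (m : Int)).2 (by omega) (by omega)
        rw [hv]
        have hs := chain_stable arr (arr.length : Int)
          (((arr.length : Int) - 1 - (findNextA arr (arr.length : Int) (m : Int)).2).toNat)
          ((((arr.length : Int) - 1 - (findNextA arr (arr.length : Int) (m : Int)).2).toNat) + 1)
          (((arr.length : Int) - 1 - (m : Int)).toNat)
          (findNextA arr (arr.length : Int) (m : Int)).2 (by omega) (by omega) (by omega)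
        rw [hs]
        simp [chainB, hne, hb]
    · rw [if_neg hje]
      exact hr j (by omega) hjn

-- ===== VERDICT (by name: the statement is the Claim_ definition above) =====
theorem solution_spec : Claim_equal_solution := by
  intro arr _
  show solution arr = solution_alt arr
  by_cases h0 : arr = []
  · subst h0; rfl
  · have hlen : 1 ≤ arr.length := List.length_pos_iff.mpr h0
    simp only [solution, solution_alt, PySem.List.len_eq]
    rw [if_pos (by exact_mod_cast hlen)]
    have hcast : ((arr.length : Int)) - 2 = ((arr.length - 1 : Nat) : Int) - 1 := by
      push_cast [hlen]; ring
    rw [hcast]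
    have hr := down arr (arr.length - 1)
      ((PySem.Dict.empty : PySem.Dict Int Bool).insert ((arr.length : Int) - 1) true)
      (by push_cast [hlen]; omega)
      (by
        intro j hj0 hj1
        have : j = (arr.length : Int) - 1 := by push_cast [hlen] at hj0; omega
        subst this
        rw [PySem.Dict.getD_insert_self]
        simp [chainB])
    rw [PySem.List.foldl_add, PySem.List.foldl_add, zero_add]
    congr 1
    refine congrArg List.sum ?_
    apply List.map_congr_left
    intro i hi
    rw [PySem.List.mem_pyRange_one] at hi
    rw [chase_eq_chain]
    rw [chain_stable arr (arr.length : Int)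
      (((arr.length : Int) - 1 - i).toNat) (arr.length + 1)
      ((((arr.length : Int) - 1 - i).toNat) + 1) i (by omega) (by omega) (by omega)]
    rw [hr i (by omega) (by omega)]
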